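-- pv_equiv track=rewrite | github.com/DavidRubio24/scanGUI | utils.py | increase_name
-- ===== SOURCE A (Python) =====
-- def increase_name(name):
--     """Increase the digits in a name."""
--     # Increase the least significant digit within the name
--     for i in range(len(name) - 1, -2, -1):
--         if i == -1:
--             # There is no digit in the name that can be increased
--             name = '1' + name
--             break
--         if name[i] in '012345678':
--             # Increase the digit and we are done
--             name = name[:i] + str(int(name[i]) + 1) + name[i + 1:]
--             break
--         elif name[i] == '9':
--             # We still have to increase the next digit
--             name = name[:i] + '0' + name[i + 1:]
--     return name
-- ===== SOURCE B (Python) =====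
-- def increase_name(name):
--     """Increase the digits in a name."""
--     i = max((j for j, c in enumerate(name) if c in '012345678'), default=-1)
--     zeroed = ''.join('0' if c == '9' else c for c in name[i + 1:])
--     if i == -1:
--         return '1' + zeroed
--     return name[:i] + chr(ord(name[i]) + 1) + zeroed
-- ===== Notes on version B (the rewrite author's own statement) =====
-- stated objective: simpler
-- what changed: A's right-to-left carry loop that rewrites the string step by step is replaced by a single forward pivot search (last index holding '0'-'8') plus one bulk zeroing of the '9's in the suffix after the pivot, stitched together with slices.
import Mathlib
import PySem

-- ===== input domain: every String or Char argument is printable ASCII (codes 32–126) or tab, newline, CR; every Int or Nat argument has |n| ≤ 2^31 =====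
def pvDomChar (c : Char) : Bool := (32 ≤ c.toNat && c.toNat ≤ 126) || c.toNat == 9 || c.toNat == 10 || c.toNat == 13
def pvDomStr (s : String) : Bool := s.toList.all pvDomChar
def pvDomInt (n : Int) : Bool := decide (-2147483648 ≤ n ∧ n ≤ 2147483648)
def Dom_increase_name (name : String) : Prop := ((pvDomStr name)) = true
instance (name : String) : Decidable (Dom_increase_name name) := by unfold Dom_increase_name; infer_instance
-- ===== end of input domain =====

-- B replaces A's right-to-left carry loop by a single forward pivot scan plus a bulk
-- zeroing of the suffix (objective: simpler decomposition; same return value, no side effects).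

-- ===== PORT A =====
-- A's loop 'for i in range(len(name)-1, -2, -1)', transliterated as recursion on i+1:
-- fuel n means current Python index is n-1; n = 0 is the i == -1 iteration.
-- str(int(name[i]) + 1) is ported as Char.ofNat (c.toNat + 1), exact for c in '0'..'8'.
def aLoop : List Char → Nat → List Char
  | cs, 0 => '1' :: cs
  | cs, (n+1) =>
    let c := cs.getD n ' '
    if ("012345678".toList.contains c) then cs.set n (Char.ofNat (c.toNat + 1))
    else if c = '9' then aLoop (cs.set n '0') n
    else aLoop cs n

def increase_name (name : String) : String :=
  String.mk (aLoop name.toList name.toList.length)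

-- ===== PORT B =====
-- max((j for j, c in enumerate(name) if c in '012345678'), default=-1)
def lastDigitIdx (cs : List Char) : Int :=
  (PySem.List.enumerate cs).foldl
    (fun acc p => if ("012345678".toList.contains p.2) then p.1 else acc) (-1)

-- body of Source B on the character list: pivot, zeroed suffix, then slice-and-splice
def altL (cs : List Char) : List Char :=
  let i := lastDigitIdx cs
  let zeroed := (cs.drop (i + 1).toNat).map (fun c => if c = '9' then '0' else c)
  if i = -1 then '1' :: zeroed
  else cs.take i.toNat ++ Char.ofNat ((cs.getD i.toNat ' ').toNat + 1) :: zeroed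

def increase_name_alt (name : String) : String :=
  String.mk (altL name.toList)

-- ===== PRECONDITION & SPEC =====
def Spec_increase_name (name : String) (out : String) : Prop := out = increase_name_alt name
instance (name : String) (out : String) : Decidable (Spec_increase_name name out) := by unfold Spec_increase_name; infer_instance

-- ===== CLAIM (what is proved, stated in full; the proofs are below) =====
def Claim_equal_increase_name : Prop := ∀ (name : String), Dom_increase_name name → Spec_increase_name name (increase_name name)

-- ===== LEMMAS AND PROOFS =====

theorem aLoop_append (s t : List Char) :
    ∀ n, n ≤ t.length → aLoop (t ++ s) n = aLoop t n ++ s := by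
  intro n
  induction n generalizing t s with
  | zero => intro _; simp [aLoop]
  | succ n ih =>
    intro hn
    have hlt : n < t.length := by omega
    simp only [aLoop, List.getD_append _ _ _ _ hlt]
    split_ifs with h1 h2
    · simp [List.set_append, hlt]
    · rw [List.set_append_left _ _ hlt, ih _ _ (by simp; omega)]
    · exact ih _ _ (by omega)

theorem lastDigitIdx_concat (t : List Char) (c : Char) :
    lastDigitIdx (t ++ [c]) =
      if ("012345678".toList.contains c) then (t.length : Int) else lastDigitIdx t := by
  simp only [lastDigitIdx, PySem.List.enumerate_append, List.foldl_append]
  simp [PySem.List.enumerate]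

theorem lastDigitIdx_bounds (cs : List Char) :
    -1 ≤ lastDigitIdx cs ∧ lastDigitIdx cs < (cs.length : Int) := by
  induction cs using List.reverseRecOn with
  | nil => simp [lastDigitIdx, PySem.List.enumerate]
  | append_singleton t c ih =>
    rw [lastDigitIdx_concat]
    split_ifs <;> simp <;> omega

-- appending a non-pivot char just appends its zeroed image to B's answer
theorem altL_concat_nondigit (t : List Char) (c : Char)
    (h : ("012345678".toList.contains c) = false) :
    altL (t ++ [c]) = altL t ++ [if c = '9' then '0' else c] := by
  obtain ⟨hlo, hhi⟩ := lastDigitIdx_bounds t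
  unfold altL
  rw [lastDigitIdx_concat, h]
  simp only [Bool.false_eq_true, if_false]
  have hle : ((lastDigitIdx t) + 1).toNat ≤ t.length := by omega
  rw [List.drop_append_of_le_length hle, List.map_append]
  by_cases h0 : lastDigitIdx t = -1
  · simp [h0]
  · have hpos : 0 ≤ lastDigitIdx t := by omega
    have hlt : (lastDigitIdx t).toNat < t.length := by omega
    simp only [if_neg h0]
    rw [List.take_append_of_le_length (by omega), List.getD_append _ _ _ _ hlt]
    simp

theorem main_eq (cs : List Char) : aLoop cs cs.length = altL cs := by
  induction cs using List.reverseRecOn with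
  | nil => simp [aLoop, altL, lastDigitIdx, PySem.List.enumerate]
  | append_singleton t c ih =>
    have hlen : (t ++ [c]).length = t.length + 1 := by simp
    rw [hlen]
    have hget : (t ++ [c]).getD t.length ' ' = c := by simp
    by_cases hd : ("012345678".toList.contains c) = true
    · -- pivot at the last position
      simp only [aLoop, hget, hd, if_true]
      unfold altL
      rw [lastDigitIdx_concat, if_pos hd]
      have h1 : ((t.length : Int) + 1).toNat = t.length + 1 := by omega
      have h2 : ((t.length : Int)).toNat = t.length := by omega
      have hdrop : List.drop (t.length + 1) (t ++ [c]) = [] := by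
        apply List.drop_eq_nil_of_le; simp
      rw [if_neg (by omega : ¬ ((t.length : Int) = -1))]
      simp [h1, h2, hdrop, hget, List.set_append_right _ _ (le_refl t.length),
            List.take_append_of_le_length (le_refl t.length)]
    · have hd' : ("012345678".toList.contains c) = false := by simpa using hd
      by_cases h9 : c = '9'
      · subst h9
        have hset : (t ++ ['9']).set t.length '0' = t ++ ['0'] := by
          rw [List.set_append_right _ _ (le_refl t.length)]; simp
        have step : aLoop (t ++ ['9']) (t.length + 1) = aLoop (t ++ ['0']) t.length := by
          simp [aLoop, hget, hd', hset]
        rw [step, aLoop_append ['0'] t t.length (le_refl t.length), ih,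
            altL_concat_nondigit t '9' (by decide)]
        simp
      · have hC : ¬ (c = '0' ∨ c = '1' ∨ c = '2' ∨ c = '3' ∨ c = '4' ∨ c = '5' ∨
            c = '6' ∨ c = '7' ∨ c = '8') := by simpa using hd
        have step : aLoop (t ++ [c]) (t.length + 1) = aLoop (t ++ [c]) t.length := by
          simp [aLoop, hget, hC, h9]
        rw [step, aLoop_append [c] t t.length (le_refl t.length), ih,
            altL_concat_nondigit t c hd']
        simp [h9]

-- ===== VERDICT (by name: the statement is the Claim_ definition above) =====
theorem increase_name_spec : Claim_equal_increase_name := by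
  intro name _
  show increase_name name = increase_name_alt name
  unfold increase_name increase_name_alt
  rw [main_eq]
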